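-- pv_equiv track=rewrite | github.com/Dx-by-Dy/Python-programs | p_number.py | I_win
-- ===== SOURCE A (Python) =====
-- def I_win(Table):
-- 	win = True
-- 	sign = 0
-- 	for i in range(Size_table):
-- 		for j in range(Size_table):
-- 			if Table[i][j] != 0 and sign == 0: sign = Table[i][j]
-- 			if Table[i][j] != 0 and Table[i][j] * sign < 0:
-- 				win = False
-- 				break
-- 		if win == False: break
-- 	return win
--
-- Size_table = 8
-- ===== SOURCE B (Python) =====
-- Size_table = 8
--
-- def I_win(Table):
--     def go(k, seen_pos, seen_neg):
--         if seen_pos and seen_neg: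
--             return False
--         if k == Size_table * Size_table:
--             return True
--         x = Table[k // Size_table][k % Size_table]
--         return go(k + 1, seen_pos or x > 0, seen_neg or x < 0)
--     return go(0, False, False)
-- ===== Notes on version B (the rewrite author's own statement) =====
-- stated objective: alternative
-- what changed: A's nested row/column loops with a first-sign sentinel, a win flag, a sign-product break test and two break statements become a tail-recursive walk over a single flattened cell index k (row = k // 8, column = k % 8) that carries two independent seen-positive/seen-negative flags and stops as soon as both are present.
import Mathlib
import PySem

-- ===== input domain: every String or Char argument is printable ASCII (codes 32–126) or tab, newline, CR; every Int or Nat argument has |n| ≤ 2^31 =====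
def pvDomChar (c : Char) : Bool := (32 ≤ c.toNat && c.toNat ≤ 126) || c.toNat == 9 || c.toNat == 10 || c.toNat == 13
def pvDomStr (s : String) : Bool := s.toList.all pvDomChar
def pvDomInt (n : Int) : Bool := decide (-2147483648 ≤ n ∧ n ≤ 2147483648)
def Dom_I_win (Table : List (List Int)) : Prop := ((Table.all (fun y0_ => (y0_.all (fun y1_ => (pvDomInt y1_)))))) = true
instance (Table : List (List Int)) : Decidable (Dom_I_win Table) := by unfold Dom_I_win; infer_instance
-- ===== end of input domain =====

-- B replaces A's nested loops with first-sign sentinel, win flag and sign-product break test by a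
-- tail-recursive walk over one flattened cell index carrying two seen-sign flags (objective: alternative).

-- ===== PORT A =====
def SizeTable : Int := 8

-- inner 'for j in range(Size_table)' loop with its break
def I_winJ (row : List Int) (js : List Int) (win : Bool) (sign : Int) : Bool × Int :=
  match js with
  | [] => (win, sign)
  | j :: rest =>
    let v := PySem.List.pyGetD row j 0          -- Table[i][j]; in range wherever A reads it under Pre_
    let sign1 := if v ≠ 0 ∧ sign = 0 then v else sign
    if v ≠ 0 ∧ v * sign1 < 0 then (false, sign1)   -- win = False; break
    else I_winJ row rest win sign1

-- outer 'for i in range(Size_table)' loop with its 'if win == False: break'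
def I_winI (Table : List (List Int)) (is_ : List Int) (win : Bool) (sign : Int) : Bool :=
  match is_ with
  | [] => win
  | i :: rest =>
    let row := PySem.List.pyGetD Table i []     -- Table[i]; in range wherever A reads it under Pre_
    let p := I_winJ row (PySem.List.pyRange 0 SizeTable 1) win sign
    if p.1 = false then p.1 else I_winI Table rest p.1 p.2

def I_win (Table : List (List Int)) : Bool :=
  I_winI Table (PySem.List.pyRange 0 SizeTable 1) true 0

-- ===== PORT B =====
-- B's recursive helper 'go'; k runs 0,1,…,64 starting from 0, so the '64 ≤ k' test is B's
-- 'k == Size_table * Size_table' (it also makes termination evident). k ≥ 0 always, so the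
-- Nat '/' and '%' are exactly Python's k // 8 and k % 8.
def I_winGo (Table : List (List Int)) (k : ℕ) (seenP seenN : Bool) : Bool :=
  if seenP && seenN then false
  else if 64 ≤ k then true
  else
    let x := PySem.List.pyGetD (PySem.List.pyGetD Table ((k / 8 : ℕ) : Int) []) ((k % 8 : ℕ) : Int) 0
      -- Table[k // Size_table][k % Size_table]; in range wherever B reads it under Pre_
    I_winGo Table (k + 1) (seenP || decide (0 < x)) (seenN || decide (x < 0))
termination_by 64 - k

def I_win_alt (Table : List (List Int)) : Bool :=
  I_winGo Table 0 false false

-- ===== PRECONDITION & SPEC =====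
-- the cells A (and B, in the same order) inspects before hitting the first absent index: the full
-- first rows that have at least 8 entries, then the whole first shorter row (if any), within the first 8 rows
def pvVisited (Table : List (List Int)) : List Int :=
  (((Table.take 8).takeWhile (fun r => decide (8 ≤ r.length))).flatMap (fun r => r.take 8))
    ++ (((Table.take 8).dropWhile (fun r => decide (8 ≤ r.length))).headD [])

-- Pre_ is exactly where both Pythons return: either the table has a full 8x8 prefix (no IndexError
-- is possible), or the cells visited before the first absent index already contain both a positive
-- and a negative value, so the scan answers False before raising IndexError.
def Pre_I_win (Table : List (List Int)) : Prop :=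
  (8 ≤ Table.length ∧ ∀ row ∈ Table.take 8, 8 ≤ row.length)
  ∨ ((∃ x ∈ pvVisited Table, 0 < x) ∧ (∃ y ∈ pvVisited Table, y < 0))
instance (Table : List (List Int)) : Decidable (Pre_I_win Table) := by unfold Pre_I_win; infer_instance

def pvWitness_I_win : List (List Int) := List.replicate 8 (List.replicate 8 0)

def Spec_I_win (Table : List (List Int)) (out : Bool) : Prop := out = I_win_alt Table
instance (Table : List (List Int)) (out : Bool) : Decidable (Spec_I_win Table out) := by unfold Spec_I_win; infer_instance

-- ===== CLAIM (what is proved, stated in full; the proofs are below) =====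
def Claim_equal_I_win : Prop := ∀ (Table : List (List Int)), Dom_I_win Table → Pre_I_win Table → Spec_I_win Table (I_win Table)

-- ===== LEMMAS AND PROOFS =====

-- value-level version of A's inner loop (proof device)
def stepVals (vs : List Int) (win : Bool) (sign : Int) : Bool × Int :=
  match vs with
  | [] => (win, sign)
  | v :: rest =>
    let sign1 := if v ≠ 0 ∧ sign = 0 then v else sign
    if v ≠ 0 ∧ v * sign1 < 0 then (false, sign1)
    else stepVals rest win sign1

-- value-level version of B's recursion (proof device)
def goVals (vs : List Int) (p n : Bool) : Bool :=
  if p && n then false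
  else
    match vs with
    | [] => true
    | v :: rest => goVals rest (p || decide (0 < v)) (n || decide (v < 0))

-- the values the pyGetD defaults produce for a row: the row clipped to 8, zero-padded
def pad8 (r : List Int) : List Int := r.take 8 ++ List.replicate (8 - r.length) 0

-- row-level version of A's outer loop (proof device)
def rowsRun (rows : List (List Int)) (win : Bool) (sign : Int) : Bool :=
  match rows with
  | [] => win
  | r :: rest =>
    let p := stepVals (pad8 r) win sign
    if p.1 = false then p.1 else rowsRun rest p.1 p.2

theorem I_winJ_eq_stepVals (row : List Int) (js : List Int) (win : Bool) (sign : Int) :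
    I_winJ row js win sign = stepVals (js.map (fun j => PySem.List.pyGetD row j 0)) win sign := by
  induction js generalizing sign with
  | nil => rfl
  | cons j rest ih => simp only [I_winJ, stepVals, List.map]; split_ifs <;> simp_all

theorem map_range_pad {α : Type} (xs : List α) (n : ℕ) (d : α) :
    (PySem.List.pyRange 0 (n : Int) 1).map (fun j => PySem.List.pyGetD xs j d)
      = xs.take n ++ List.replicate (n - xs.length) d := by
  apply List.ext_getElem
  · simp [PySem.List.length_pyRange_one]; omega
  · intro i h1 h2
    have hi : i < n := by simpa [PySem.List.length_pyRange_one] using h1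
    rw [List.getElem_map]
    rw [PySem.List.getElem_pyRange_one]
    by_cases hx : i < xs.length
    · rw [List.getElem_append_left (by simp; omega)]
      simp [PySem.List.pyGetD_natCast, List.getD_eq_getElem?_getD, List.getElem?_eq_getElem hx,
        List.getElem_take]
    · rw [List.getElem_append_right (by simp; omega)]
      simp [PySem.List.pyGetD_natCast, List.getD_eq_getElem?_getD,
        List.getElem?_eq_none (by omega : xs.length ≤ i), List.getElem_replicate]

theorem I_winJ_pad (row : List Int) (win : Bool) (sign : Int) :
    I_winJ row (PySem.List.pyRange 0 SizeTable 1) win sign = stepVals (pad8 row) win sign := by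
  rw [I_winJ_eq_stepVals]
  rw [show (SizeTable : Int) = ((8 : ℕ) : Int) by norm_num [SizeTable]]
  rw [map_range_pad row 8 0]
  rfl

theorem I_winI_eq_rowsRun (Table : List (List Int)) (n a : ℕ) (win : Bool) (s : Int) :
    I_winI Table (PySem.List.pyRange (a : Int) ((a : Int) + (n : Int)) 1) win s
      = rowsRun ((PySem.List.pyRange (a : Int) ((a : Int) + (n : Int)) 1).map
          (fun i => PySem.List.pyGetD Table i [])) win s := by
  induction n generalizing a win s with
  | zero => simp [PySem.List.pyRange_one_eq_nil, I_winI, rowsRun]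
  | succ m ih =>
    have hconsR : PySem.List.pyRange (a : Int) ((a : Int) + ((m : ℕ) + 1 : ℕ)) 1
        = (a : Int) :: PySem.List.pyRange ((a : Int) + 1) ((a : Int) + ((m : ℕ) + 1 : ℕ)) 1 :=
      PySem.List.pyRange_one_cons (by push_cast; omega)
    rcases hp : stepVals (pad8 (PySem.List.pyGetD Table (a : Int) [])) win s with ⟨w, s'⟩
    rw [hconsR]
    simp only [I_winI, rowsRun, List.map_cons, I_winJ_pad, hp]
    cases w
    · simp
    · have hni : ¬((true, s').1 = false) := by simp
      rw [if_neg hni, if_neg hni]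
      have h1 : ((a : Int) + 1) = (((a + 1 : ℕ) : ℕ) : Int) := by push_cast; ring
      have h2 : ((a : Int) + ((m : ℕ) + 1 : ℕ)) = (((a + 1 : ℕ) : ℕ) : Int) + ((m : ℕ) : Int) := by
        push_cast; ring
      rw [h1, h2, ih (a + 1) true s']

theorem rowsRun_eq_stepVals (rows : List (List Int)) (s : Int) :
    rowsRun rows true s = (stepVals (rows.flatMap pad8) true s).1 := by
  induction rows generalizing s with
  | nil => rfl
  | cons r rest ih =>
    simp only [rowsRun, List.flatMap_cons]
    have happ : ∀ vs1 vs2 s, stepVals (vs1 ++ vs2) true s =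
        (if (stepVals vs1 true s).1 then stepVals vs2 true (stepVals vs1 true s).2
         else stepVals vs1 true s) := by
      intro vs1
      induction vs1 with
      | nil => intro vs2 s; simp [stepVals]
      | cons v rest ih =>
        intro vs2 s
        simp only [List.cons_append, stepVals]
        split_ifs <;> simp_all
    rw [happ]
    rcases hp : stepVals (pad8 r) true s with ⟨w, s'⟩
    cases w <;> simp_all

theorem sign_mul_neg (v s : Int) (hv : v ≠ 0) (hs : s ≠ 0) :
    (v * s < 0) ↔ ¬((0 < v) ↔ (0 < s)) := by
  rw [mul_neg_iff]; omega

-- one unfolding step of A's value-level scan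
theorem stepVals_cons (v : Int) (rest : List Int) (w : Bool) (s : Int) :
    stepVals (v :: rest) w s
      = (if v ≠ 0 ∧ v * (if v ≠ 0 ∧ s = 0 then v else s) < 0
         then (false, if v ≠ 0 ∧ s = 0 then v else s)
         else stepVals rest w (if v ≠ 0 ∧ s = 0 then v else s)) := rfl

-- B's recursion answers False on (true,true) flags no matter the remaining cells
theorem goVals_tt (vs : List Int) : goVals vs true true = false := by
  cases vs <;> simp [goVals]

-- the core: A's sentinel scan equals B's two-flag scan, over the same value list;
-- the flags are determined by the sentinel: p = (0 < sign), n = (sign < 0)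
theorem stepVals_eq_goVals (vs : List Int) (s : Int) :
    (stepVals vs true s).1 = goVals vs (decide (0 < s)) (decide (s < 0)) := by
  induction vs generalizing s with
  | nil =>
    have hpn : (decide (0 < s) && decide (s < 0)) = false := by
      by_cases h : 0 < s
      · have h2 : ¬ s < 0 := by omega
        simp [h2]
      · simp [h]
    simp [stepVals, goVals, hpn]
  | cons v rest ih =>
    have hpn : (decide (0 < s) && decide (s < 0)) = false := by
      by_cases h : 0 < s
      · have h2 : ¬ s < 0 := by omega
        simp [h2]
      · simp [h]
    have hgo : goVals (v :: rest) (decide (0 < s)) (decide (s < 0))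
        = goVals rest (decide (0 < s) || decide (0 < v)) (decide (s < 0) || decide (v < 0)) := by
      simp [goVals, hpn]
    rw [hgo]
    by_cases hv : v = 0
    · subst hv
      have e1 : (stepVals (0 :: rest) true s).1 = (stepVals rest true s).1 := by
        simp [stepVals]
      rw [e1, ih s]
      norm_num
    · by_cases hs : s = 0
      · subst hs
        have e1 : (stepVals (v :: rest) true 0).1 = (stepVals rest true v).1 := by
          rw [stepVals_cons]
          rw [show (if v ≠ 0 ∧ (0:Int) = 0 then v else 0) = v from if_pos ⟨hv, rfl⟩]
          rw [if_neg (by rintro ⟨_, hneg⟩; nlinarith [mul_self_nonneg v])]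
        rw [e1, ih v]
        norm_num
      · have e0 : (if v ≠ 0 ∧ s = 0 then v else s) = s := by simp [hs]
        have e1 : (stepVals (v :: rest) true s).1
            = if v * s < 0 then false else (stepVals rest true s).1 := by
          rw [stepVals_cons, e0]
          by_cases hc : v * s < 0
          · rw [if_pos ⟨hv, hc⟩, if_pos hc]
          · rw [if_neg (fun h => hc h.2), if_neg hc]
        rw [e1]
        by_cases hc : v * s < 0
        · rw [if_pos hc]
          have hop : ¬((0 < v) ↔ (0 < s)) := (sign_mul_neg v s hv hs).mp hc
          have hP : (decide (0 < s) || decide (0 < v)) = true := by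
            by_cases h : 0 < v
            · simp [h]
            · have : 0 < s := by omega
              simp [this]
          have hN : (decide (s < 0) || decide (v < 0)) = true := by
            by_cases h : 0 < v
            · have : s < 0 := by omega
              simp [this]
            · have : v < 0 := by omega
              simp [this]
          rw [hP, hN, goVals_tt]
        · rw [if_neg hc]
          have hsame : (0 < v) ↔ (0 < s) := by
            by_contra h
            exact hc ((sign_mul_neg v s hv hs).mpr h)
          have hP : (decide (0 < s) || decide (0 < v)) = decide (0 < s) := by
            by_cases h : 0 < s
            · simp [h]
            · have h3 : ¬ 0 < v := fun h' => h (hsame.mp h')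
              simp [h, h3]
          have hN : (decide (s < 0) || decide (v < 0)) = decide (s < 0) := by
            by_cases h : 0 < s
            · have h1 : ¬ s < 0 := by omega
              have h2 : ¬ v < 0 := by
                have := hsame.mpr h
                omega
              simp [h1, h2]
            · have h1 : s < 0 := by omega
              simp [h1]
          rw [hP, hN]
          exact ih s

-- unfolding B's recursion into goVals over the value list of the remaining cells
theorem I_winGo_eq_goVals (Table : List (List Int)) (n : ℕ) :
    ∀ (k : ℕ) (p q : Bool), k + n = 64 →
      I_winGo Table k p q
        = goVals ((List.range' k n).map
            (fun m => PySem.List.pyGetD (PySem.List.pyGetD Table ((m / 8 : ℕ) : Int) []) ((m % 8 : ℕ) : Int) 0)) p q := by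
  induction n with
  | zero =>
    intro k p q hk
    have h64 : (64:ℕ) ≤ k := by omega
    rw [I_winGo]
    simp [goVals, h64]
  | succ m ih =>
    intro k p q hk
    have hlt : ¬ (64:ℕ) ≤ k := by omega
    rw [List.range'_succ, List.map_cons]
    rcases hb : p && q with _ | _
    · have hgo : ∀ (w : Int) (l : List Int),
          goVals (w :: l) p q = goVals l (p || decide (0 < w)) (q || decide (w < 0)) := by
        intro w l
        simp [goVals, hb]
      rw [I_winGo, if_neg (by simp [hb]), if_neg hlt, hgo]
      exact ih (k + 1) _ _ (by omega)
    · rw [I_winGo, if_pos (by simp [hb])]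
      simp [goVals, hb]

-- the 64 flattened cell reads of B are exactly the 8 padded rows A effectively scans
theorem flat_eq (Table : List (List Int)) :
    ((PySem.List.pyRange 0 SizeTable 1).map (fun i => PySem.List.pyGetD Table i [])).flatMap pad8
      = (List.range' 0 64).map
          (fun m => PySem.List.pyGetD (PySem.List.pyGetD Table ((m / 8 : ℕ) : Int) []) ((m % 8 : ℕ) : Int) 0) := by
  have hpad : ∀ r : List Int, pad8 r =
      [PySem.List.pyGetD r 0 0, PySem.List.pyGetD r 1 0, PySem.List.pyGetD r 2 0,
       PySem.List.pyGetD r 3 0, PySem.List.pyGetD r 4 0, PySem.List.pyGetD r 5 0,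
       PySem.List.pyGetD r 6 0, PySem.List.pyGetD r 7 0] := by
    intro r
    have h := (map_range_pad r 8 0).symm
    unfold pad8
    rw [h]
    rw [show PySem.List.pyRange 0 (((8:ℕ)) : Int) 1 = [0,1,2,3,4,5,6,7] by decide]
    rfl
  rw [show PySem.List.pyRange 0 SizeTable 1 = [0,1,2,3,4,5,6,7] by decide]
  rw [show List.range' 0 64 = [0,1,2,3,4,5,6,7,8,9,10,11,12,13,14,15,16,17,18,19,20,21,22,23,
    24,25,26,27,28,29,30,31,32,33,34,35,36,37,38,39,40,41,42,43,44,45,46,47,48,49,50,51,52,53,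
    54,55,56,57,58,59,60,61,62,63] from rfl]
  simp only [List.map_cons, List.map_nil, List.flatMap_cons, List.flatMap_nil, hpad]
  norm_num

-- ===== VERDICT (by name: the statement is the Claim_ definition above) =====
theorem I_win_spec : Claim_equal_I_win := by
  intro Table _hDom _hPre
  unfold Spec_I_win
  unfold I_win I_win_alt
  rw [show PySem.List.pyRange 0 SizeTable 1
      = PySem.List.pyRange ((0 : ℕ) : Int) (((0 : ℕ) : Int) + ((8 : ℕ) : Int)) 1 by norm_num [SizeTable]]
  rw [I_winI_eq_rowsRun Table 8 0 true 0]
  rw [rowsRun_eq_stepVals]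
  rw [show PySem.List.pyRange ((0 : ℕ) : Int) (((0 : ℕ) : Int) + ((8 : ℕ) : Int)) 1
      = PySem.List.pyRange 0 SizeTable 1 by norm_num [SizeTable]]
  rw [flat_eq]
  rw [stepVals_eq_goVals]
  rw [I_winGo_eq_goVals Table 64 0 false false (by omega)]
  norm_num
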